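-- pv_equiv track=rewrite | github.com/P4v4n5/my_projects | Computer_Networks/Knapsack_Encryption/test/1_test.py | generate_superincreasing_knapsack
-- ===== SOURCE A (Python) =====
-- def generate_superincreasing_knapsack(n_elements):
--     knapsack = []
--     total = 0
--     for i in range(n_elements):
--         element = total + 1  # Make sure the next element is greater than the sum of previous elements
--         knapsack.append(element)
--         total += element
--     return knapsack
-- ===== SOURCE B (Python) =====
-- def generate_superincreasing_knapsack(n_elements):
--     # closed form: element i is 1 << i, no running-total accumulator needed
--     return [1 << i for i in range(n_elements)]
-- ===== Notes on version B (the rewrite author's own statement) =====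
-- stated objective: simpler
-- what changed: Replaces the running-sum accumulator loop (element = total+1, total += element) with the closed form 1 << i computed directly from each index.
import Mathlib
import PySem

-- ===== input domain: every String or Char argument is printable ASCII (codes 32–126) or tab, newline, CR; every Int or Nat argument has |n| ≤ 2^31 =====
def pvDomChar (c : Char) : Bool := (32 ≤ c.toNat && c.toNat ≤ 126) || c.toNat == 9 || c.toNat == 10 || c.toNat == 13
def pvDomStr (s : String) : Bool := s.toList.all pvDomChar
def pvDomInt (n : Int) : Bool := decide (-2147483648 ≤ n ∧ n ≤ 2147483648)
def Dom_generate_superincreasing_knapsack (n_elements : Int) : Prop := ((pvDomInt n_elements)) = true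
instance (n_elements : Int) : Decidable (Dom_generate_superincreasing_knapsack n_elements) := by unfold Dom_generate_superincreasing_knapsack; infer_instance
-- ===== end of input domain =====

-- ===== PORT A =====
-- A: loop over range(n_elements) appending total+1 and adding it into the running total.
def generate_superincreasing_knapsack (n_elements : Int) : List Int :=
  ((PySem.List.pyRange 0 n_elements 1).foldl
    (fun (st : List Int × Int) _i =>
      let element := st.2 + 1
      (st.1 ++ [element], st.2 + element)) ([], 0)).1

-- ===== PORT B =====
-- B: closed form, element i = 1 << i  ([1 << i for i in range(n_elements)])
def generate_superincreasing_knapsack_alt (n_elements : Int) : List Int :=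
  (PySem.List.pyRange 0 n_elements 1).map (fun i => (1 : Int) <<< i.toNat)

-- ===== PRECONDITION & SPEC =====
def Spec_generate_superincreasing_knapsack (n_elements : Int) (out : List Int) : Prop := out = generate_superincreasing_knapsack_alt n_elements
instance (n_elements : Int) (out : List Int) : Decidable (Spec_generate_superincreasing_knapsack n_elements out) := by unfold Spec_generate_superincreasing_knapsack; infer_instance

-- ===== CLAIM (what is proved, stated in full; the proofs are below) =====
def Claim_equal_generate_superincreasing_knapsack : Prop := ∀ (n_elements : Int), Dom_generate_superincreasing_knapsack n_elements → Spec_generate_superincreasing_knapsack n_elements (generate_superincreasing_knapsack n_elements)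

-- ===== LEMMAS AND PROOFS =====
-- loop invariant: starting from (acc, t), after m ignored steps the loop has appended
-- 2^k*(t+1) for k < m and the running total is 2^m*(t+1) - 1
theorem pvLoopA (l : List Int) (acc : List Int) (t : Int) :
    l.foldl (fun (st : List Int × Int) _i =>
      let element := st.2 + 1
      (st.1 ++ [element], st.2 + element)) (acc, t)
    = (acc ++ (List.range l.length).map (fun k => 2 ^ k * (t + 1)),
       2 ^ l.length * (t + 1) - 1) := by
  induction l generalizing acc t with
  | nil => simp
  | cons a l ih =>
    simp only [List.foldl_cons, ih, List.length_cons, List.range_succ_eq_map,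
      List.map_cons, List.map_map, Prod.mk.injEq]
    constructor
    · rw [List.append_assoc]
      simp only [List.singleton_append]
      congr 1
      congr 1
      · ring
      · exact List.map_congr_left (fun k _ => by simp [Function.comp, pow_succ]; ring)
    · rw [pow_succ]
      ring

-- ===== VERDICT (by name: the statement is the Claim_ definition above) =====
theorem generate_superincreasing_knapsack_spec : Claim_equal_generate_superincreasing_knapsack := by
  intro n _
  unfold Spec_generate_superincreasing_knapsack generate_superincreasing_knapsack
    generate_superincreasing_knapsack_alt
  rw [PySem.List.pyRange_one, pvLoopA, List.map_map]
  simp only [List.nil_append, List.length_map, List.length_range]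
  exact List.map_congr_left fun k _ => by
    simp only [Function.comp]
    rw [Int.one_shiftLeft]
    simp
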